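-- pv_equiv track=rewrite | github.com/vikramlucky/Coachable-Vikram-Lucky-Repository | leetcode/stacks/leetcode_2104_sum_of_subarray_ranges.py | get_next_and_prev_smaller_greater
-- ===== SOURCE A (Python) =====
-- from collections import deque
--
-- def get_next_and_prev_smaller_greater(arr) -> int:
--     '''Helper function'''
--     n = len(arr)
--     next_smaller = [n for x in arr]
--     prev_smaller = [-1 for x in arr]
--
--     next_greater = [n for x in arr]
--     prev_greater = [-1 for x in arr]
--     stack  = deque()
--
--     # Next and previous smaller
--     for idx, num in enumerate(arr):
--         while len(stack) > 0 and arr[stack[-1]] > num: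
--             next_smaller[stack.pop()] = idx
--             # This while loop will end:
--                 # 1. When no elements in the stack
--                 # 2. Element on top of the stack is < arr[idx]
--                     # we can update prev_smaller of curr idx to stack[-1]
--         prev_smaller[idx] = stack[-1] if len(stack) else -1
--         stack.append(idx)
--
--     # Calculate next greater and previous greater
--     stack = deque()
--     for idx, num in enumerate(arr):
--
--         while len(stack) and arr[stack[-1]] < num:
--             next_greater[stack.pop()] = idx
--         prev_greater[idx] = stack[-1] if len(stack) > 0 else -1
--         stack.append(idx)
--
--     return next_smaller, prev_smaller, next_greater, prev_greater
-- ===== SOURCE B (Python) =====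
-- def get_next_and_prev_smaller_greater(arr) -> int:
--     '''Helper function'''
--     n = len(arr)
--     next_smaller = [n] * n
--     prev_smaller = [-1] * n
--     next_greater = [n] * n
--     prev_greater = [-1] * n
--
--     # prev_smaller: forward pass, pop strictly-greater tops
--     stack = []
--     for idx, num in enumerate(arr):
--         while stack and arr[stack[-1]] > num:
--             stack.pop()
--         prev_smaller[idx] = stack[-1] if stack else -1
--         stack.append(idx)
--
--     # prev_greater: forward pass, pop strictly-smaller tops
--     stack = []
--     for idx, num in enumerate(arr):
--         while stack and arr[stack[-1]] < num:
--             stack.pop()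
--         prev_greater[idx] = stack[-1] if stack else -1
--         stack.append(idx)
--
--     # next_smaller: right-to-left pass, pop tops >= current
--     stack = []
--     for idx in range(n - 1, -1, -1):
--         num = arr[idx]
--         while stack and arr[stack[-1]] >= num:
--             stack.pop()
--         next_smaller[idx] = stack[-1] if stack else n
--         stack.append(idx)
--
--     # next_greater: right-to-left pass, pop tops <= current
--     stack = []
--     for idx in range(n - 1, -1, -1):
--         num = arr[idx]
--         while stack and arr[stack[-1]] <= num:
--             stack.pop()
--         next_greater[idx] = stack[-1] if stack else n
--         stack.append(idx)
--
--     return next_smaller, prev_smaller, next_greater, prev_greater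
-- ===== Notes on version B (the rewrite author's own statement) =====
-- stated objective: alternative
-- what changed: Replaces A's two coupled forward passes (which assign next_* while popping and prev_* while pushing) by four independent single-purpose monotonic-stack passes: two forward passes for prev_smaller/prev_greater and two right-to-left passes (pop on >= / <=) for next_smaller/next_greater.
import Mathlib
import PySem

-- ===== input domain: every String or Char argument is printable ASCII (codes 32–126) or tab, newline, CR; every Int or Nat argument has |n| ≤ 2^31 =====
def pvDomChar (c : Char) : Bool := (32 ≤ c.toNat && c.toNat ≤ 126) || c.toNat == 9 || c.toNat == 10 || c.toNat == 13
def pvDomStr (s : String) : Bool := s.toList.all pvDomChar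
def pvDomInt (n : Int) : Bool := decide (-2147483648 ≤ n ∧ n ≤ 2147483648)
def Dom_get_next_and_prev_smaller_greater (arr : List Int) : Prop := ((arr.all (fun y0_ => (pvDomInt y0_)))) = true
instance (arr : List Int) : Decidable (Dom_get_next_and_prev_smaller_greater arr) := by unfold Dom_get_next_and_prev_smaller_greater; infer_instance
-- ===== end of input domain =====

-- B replaces A's two coupled forward stack passes (which assign next_* while popping) by four
-- independent single-purpose monotonic-stack passes (forward for prev_*, right-to-left for next_*);
-- objective: alternative decomposition, same O(n) cost.

-- ===== PORT A =====
-- The deque of indices is a List Nat with head = right end (top).  Every index on the stack is an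
-- earlier position of arr, so arr[stack[-1]] is always in range; ported as getD _ 0.
-- Inner while loop of either pass: pop while cmp arr[top] num, writing next[popped] = idx.
def pvPopA (arr : List Int) (cmp : Int → Int → Bool) (idx : Nat) (num : Int) :
    List Int → List Nat → List Int × List Nat
  | nxt, [] => (nxt, [])
  | nxt, t :: rest =>
    if cmp (arr.getD t 0) num then pvPopA arr cmp idx num (nxt.set t (idx : Int)) rest
    else (nxt, t :: rest)

-- body of one iteration 'for idx, num in enumerate(arr)' of either of A's two loops
def pvStepA (arr : List Int) (cmp : Int → Int → Bool)
    (st : List Int × List Int × List Nat) (idx : Nat) : List Int × List Int × List Nat :=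
  let num := arr.getD idx 0
  let r := pvPopA arr cmp idx num st.1 st.2.2
  let prv := st.2.1.set idx (match r.2 with | [] => (-1 : Int) | t :: _ => (t : Int))
  (r.1, prv, idx :: r.2)

-- one of A's two loops: next init [n for x in arr], prev init [-1 for x in arr], stack = deque()
def pvPassA (arr : List Int) (cmp : Int → Int → Bool) : List Int × List Int :=
  let n := arr.length
  let r := (List.range n).foldl (pvStepA arr cmp)
    (arr.map (fun _ => (n : Int)), arr.map (fun _ => (-1 : Int)), [])
  (r.1, r.2.1)

def get_next_and_prev_smaller_greater (arr : List Int) :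
    List Int × List Int × List Int × List Int :=
  let sm := pvPassA arr (fun a b => decide (a > b))   -- arr[stack[-1]] > num
  let gr := pvPassA arr (fun a b => decide (a < b))   -- arr[stack[-1]] < num
  (sm.1, sm.2, gr.1, gr.2)

-- ===== PORT B =====
-- 'while stack and arr[stack[-1]] OP num: stack.pop()' (stack of indices, head = top)
def pvDropB (arr : List Int) (pop : Int → Int → Bool) (num : Int) : List Nat → List Nat
  | [] => []
  | t :: rest => if pop (arr.getD t 0) num then pvDropB arr pop num rest else t :: rest

-- body of a forward prev pass: pop, record stack[-1] (or -1), push idx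
def pvStepP (arr : List Int) (pop : Int → Int → Bool)
    (st : List Int × List Nat) (idx : Nat) : List Int × List Nat :=
  let stk := pvDropB arr pop (arr.getD idx 0) st.2
  (st.1.set idx (match stk with | [] => (-1 : Int) | t :: _ => (t : Int)), idx :: stk)

-- prev array init [-1]*n, then 'for idx, num in enumerate(arr)'
def pvPrevPass (arr : List Int) (pop : Int → Int → Bool) : List Int :=
  ((List.range arr.length).foldl (pvStepP arr pop)
    (List.replicate arr.length (-1 : Int), [])).1

-- body of a right-to-left next pass: pop, record stack[-1] (or n), push idx
def pvStepN (arr : List Int) (pop : Int → Int → Bool)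
    (st : List Int × List Nat) (idx : Nat) : List Int × List Nat :=
  let stk := pvDropB arr pop (arr.getD idx 0) st.2
  (st.1.set idx (match stk with | [] => (arr.length : Int) | t :: _ => (t : Int)), idx :: stk)

-- next array init [n]*n, then 'for idx in range(n-1, -1, -1)' = (List.range n).reverse
def pvNextPass (arr : List Int) (pop : Int → Int → Bool) : List Int :=
  ((List.range arr.length).reverse.foldl (pvStepN arr pop)
    (List.replicate arr.length (arr.length : Int), [])).1

def get_next_and_prev_smaller_greater_alt (arr : List Int) :
    List Int × List Int × List Int × List Int :=
  (pvNextPass arr (fun a b => decide (a ≥ b)),   -- arr[stack[-1]] >= num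
   pvPrevPass arr (fun a b => decide (a > b)),   -- arr[stack[-1]] > num
   pvNextPass arr (fun a b => decide (a ≤ b)),   -- arr[stack[-1]] <= num
   pvPrevPass arr (fun a b => decide (a < b)))   -- arr[stack[-1]] < num

-- ===== PRECONDITION & SPEC =====
def Spec_get_next_and_prev_smaller_greater (arr : List Int) (out : List Int × List Int × List Int × List Int) : Prop := out = get_next_and_prev_smaller_greater_alt arr
instance (arr : List Int) (out : List Int × List Int × List Int × List Int) : Decidable (Spec_get_next_and_prev_smaller_greater arr out) := by unfold Spec_get_next_and_prev_smaller_greater; infer_instance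

-- ===== CLAIM (what is proved, stated in full; the proofs are below) =====
def Claim_equal_get_next_and_prev_smaller_greater : Prop := ∀ (arr : List Int), Dom_get_next_and_prev_smaller_greater arr → Spec_get_next_and_prev_smaller_greater arr (get_next_and_prev_smaller_greater arr)

-- ===== LEMMAS AND PROOFS =====
def sNext (cmp : Int → Int → Bool) (arr : List Int) (i : Nat) : Int :=
  match (List.range' (i+1) (arr.length - (i+1))).find?
      (fun j => cmp (arr.getD i 0) (arr.getD j 0)) with
  | some j => (j : Int)
  | none => (arr.length : Int)

def sNextP (pop : Int → Int → Bool) (arr : List Int) (i : Nat) : Int :=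
  match (List.range' (i+1) (arr.length - (i+1))).find?
      (fun j => !pop (arr.getD j 0) (arr.getD i 0)) with
  | some j => (j : Int)
  | none => (arr.length : Int)

def InvF (arr : List Int) (cmp : Int → Int → Bool) (i : Nat)
    (st : List Int × List Int × List Nat) : Prop :=
  st.1.length = arr.length ∧ st.2.1.length = arr.length ∧
  List.Pairwise (· > ·) st.2.2 ∧
  (∀ j, j ∈ st.2.2 ↔ (j < i ∧ ∀ k, j < k → k < i → cmp (arr.getD j 0) (arr.getD k 0) = false)) ∧
  (∀ j, j < arr.length →
    st.1.getD j 0 = if i ≤ j ∨ j ∈ st.2.2 then (arr.length : Int) else sNext cmp arr j)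

def InvB (arr : List Int) (pop : Int → Int → Bool) (m : Nat)
    (st : List Int × List Nat) : Prop :=
  st.1.length = arr.length ∧
  List.Pairwise (· < ·) st.2 ∧
  (∀ j, j ∈ st.2 ↔ (m ≤ j ∧ j < arr.length ∧
      ∀ k, m ≤ k → k < j → pop (arr.getD j 0) (arr.getD k 0) = false)) ∧
  (∀ j, j < arr.length →
    st.1.getD j 0 = if m ≤ j then sNextP pop arr j else (arr.length : Int))


theorem pv_find?_range'_first {p : Nat → Bool} :
    ∀ (len s i : Nat), s ≤ i → i < s + len → p i = true →
      (∀ k, s ≤ k → k < i → p k = false) →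
      (List.range' s len).find? p = some i := by
  intro len
  induction len with
  | zero => intro s i h1 h2 _ _; omega
  | succ m ih =>
    intro s i h1 h2 h3 h4
    rw [List.range'_succ]
    by_cases hs : s = i
    · subst hs
      exact List.find?_cons_of_pos (p := p) h3
    · rw [List.find?_cons_of_neg (p := p) (by simp only [h4 s le_rfl (by omega)]; exact Bool.false_ne_true)]
      exact ih (s+1) i (by omega) (by omega) h3 (fun k hk1 hk2 => h4 k (by omega) hk2)

theorem pv_find?_ext {α : Type} {p q : α → Bool} (l : List α)
    (h : ∀ x ∈ l, p x = q x) : l.find? p = l.find? q := by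
  induction l with
  | nil => rfl
  | cons a t ih =>
    rw [List.find?_cons, List.find?_cons, h a (by simp)]
    split <;> [rfl; exact ih (fun x hx => h x (by simp [hx]))]

theorem pv_eq_map_range {l : List Int} {n : Nat} {f : Nat → Int}
    (hl : l.length = n) (h : ∀ j, j < n → l.getD j 0 = f j) :
    l = (List.range n).map f := by
  apply List.ext_getElem (by simpa using hl)
  intro j hj hj'
  have hjn : j < n := by simpa using hj'
  have := h j hjn
  rw [List.getD_eq_getElem l 0 (by omega)] at this
  simpa using this

theorem pv_dropB_spec (arr : List Int) (pop : Int → Int → Bool) (num : Int) :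
    ∀ (stk : List Nat),
      List.Pairwise (fun a b => pop (arr.getD a 0) num = false → pop (arr.getD b 0) num = false) stk →
      pvDropB arr pop num stk = stk.filter (fun j => !pop (arr.getD j 0) num) := by
  intro stk
  induction stk with
  | nil => intro _; rfl
  | cons t rest ih =>
    intro hp
    rcases List.pairwise_cons.mp hp with ⟨hhd, htl⟩
    cases h : pop (arr.getD t 0) num with
    | true =>
      rw [show pvDropB arr pop num (t :: rest) = pvDropB arr pop num rest by
            simp only [pvDropB, h, if_true], ih htl, List.filter_cons]
      simp only [h, Bool.not_true, Bool.false_eq_true, if_false]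
    | false =>
      have hall : ∀ j ∈ rest, pop (arr.getD j 0) num = false := fun j hj => hhd j hj h
      rw [show pvDropB arr pop num (t :: rest) = t :: rest by
            simp only [pvDropB, h, Bool.false_eq_true, if_false], List.filter_cons]
      simp only [h, Bool.not_false, if_true]
      congr 1
      exact (List.filter_eq_self.mpr (fun j hj => by simp only [hall j hj, Bool.not_false])).symm

theorem pv_getD_set_self {l : List Int} {t : Nat} {v : Int} (h : t < l.length) :
    (l.set t v).getD t 0 = v := by
  rw [List.getD_eq_getElem?_getD, List.getElem?_set_self (by omega)]; rfl

theorem pv_getD_set_ne {l : List Int} {t j : Nat} {v : Int} (h : j ≠ t) :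
    (l.set t v).getD j 0 = l.getD j 0 := by
  rw [List.getD_eq_getElem?_getD, List.getElem?_set_ne (by omega), ← List.getD_eq_getElem?_getD]


theorem pv_popA_spec (arr : List Int) (cmp : Int → Int → Bool)
    (Hnt : ∀ a b c, cmp a b = false → cmp b c = false → cmp a c = false)
    (i : Nat) (num : Int) :
    ∀ (stk : List Nat) (nxt : List Int),
      List.Pairwise (fun a b => cmp (arr.getD b 0) (arr.getD a 0) = false) stk →
      (∀ j ∈ stk, j < nxt.length) →
      (pvPopA arr cmp i num nxt stk).2 = stk.filter (fun j => !cmp (arr.getD j 0) num) ∧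
      (pvPopA arr cmp i num nxt stk).1.length = nxt.length ∧
      (∀ j : Nat, (pvPopA arr cmp i num nxt stk).1.getD j 0 =
        if j ∈ stk ∧ cmp (arr.getD j 0) num = true then (i : Int) else nxt.getD j 0) := by
  intro stk
  induction stk with
  | nil =>
    intro nxt _ _
    refine ⟨rfl, rfl, ?_⟩
    intro j
    simp only [pvPopA, List.not_mem_nil, false_and, if_false]
  | cons t rest ih =>
    intro nxt hp hlen
    rcases List.pairwise_cons.mp hp with ⟨hhd, htl⟩
    cases h : cmp (arr.getD t 0) num with
    | true =>
      have e : pvPopA arr cmp i num nxt (t :: rest) = pvPopA arr cmp i num (nxt.set t (i : Int)) rest := by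
        simp only [pvPopA, h, if_true]
      have hlen' : ∀ j ∈ rest, j < (nxt.set t (i : Int)).length := by
        intro j hj; rw [List.length_set]; exact hlen j (by simp [hj])
      rcases ih (nxt.set t (i : Int)) htl hlen' with ⟨h1, h2, h3⟩
      rw [e]
      refine ⟨?_, ?_, ?_⟩
      · rw [h1, List.filter_cons]
        simp only [h, Bool.not_true, Bool.false_eq_true, if_false]
      · rw [h2, List.length_set]
      · intro j
        rw [h3 j]
        by_cases hjr : j ∈ rest ∧ cmp (arr.getD j 0) num = true
        · rw [if_pos hjr, if_pos ⟨List.mem_cons_of_mem _ hjr.1, hjr.2⟩]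
        · rw [if_neg hjr]
          by_cases hjt : j = t
          · subst hjt
            rw [if_pos ⟨List.mem_cons_self, h⟩]
            exact pv_getD_set_self (hlen j List.mem_cons_self)
          · rw [pv_getD_set_ne hjt, if_neg ?_]
            intro ⟨hm, hc⟩
            rcases List.mem_cons.mp hm with rfl | hm'
            · exact hjt rfl
            · exact hjr ⟨hm', hc⟩
    | false =>
      have e : pvPopA arr cmp i num nxt (t :: rest) = (nxt, t :: rest) := by
        simp only [pvPopA, h, Bool.false_eq_true, if_false]
      rw [e]
      have hall : ∀ j ∈ rest, cmp (arr.getD j 0) num = false := by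
        intro j hj
        exact Hnt _ _ _ (hhd j hj) h
      refine ⟨?_, rfl, ?_⟩
      · rw [List.filter_cons]
        simp only [h, Bool.not_false, if_true]
        congr 1
        exact (List.filter_eq_self.mpr (fun j hj => by simp only [hall j hj, Bool.not_false])).symm
      · intro j
        by_cases hj : j ∈ t :: rest ∧ cmp (arr.getD j 0) num = true
        · rcases hj with ⟨hj1, hj2⟩
          rcases List.mem_cons.mp hj1 with rfl | hj1
          · rw [h] at hj2; exact absurd hj2 (by simp)
          · rw [hall j hj1] at hj2; exact absurd hj2 (by simp)
        · rw [if_neg hj]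


theorem pv_stepF (arr : List Int) (cmp : Int → Int → Bool)
    (Hnt : ∀ a b c, cmp a b = false → cmp b c = false → cmp a c = false)
    (i : Nat) (hi : i < arr.length) (st : List Int × List Int × List Nat)
    (h : InvF arr cmp i st) : InvF arr cmp (i+1) (pvStepA arr cmp st i) := by
  obtain ⟨nxt, prv, stk⟩ := st
  obtain ⟨hn, hp, hsort, hchar, hval⟩ := h
  have hW : List.Pairwise (fun a b => cmp (arr.getD b 0) (arr.getD a 0) = false) stk := by
    refine hsort.imp_of_mem ?_
    intro a b ha hb hab
    exact (((hchar b).mp hb).2) a hab (((hchar a).mp ha).1)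
  have hlenstk : ∀ j ∈ stk, j < nxt.length := by
    intro j hj; rw [hn]; exact Nat.lt_of_lt_of_le (((hchar j).mp hj).1) (by omega)
  obtain ⟨p1, p2, p3⟩ := pv_popA_spec arr cmp Hnt i (arr.getD i 0) stk nxt hW hlenstk
  set r := pvPopA arr cmp i (arr.getD i 0) nxt stk with hr
  have hmemf : ∀ j, j ∈ r.2 ↔ (j ∈ stk ∧ cmp (arr.getD j 0) (arr.getD i 0) = false) := by
    intro j
    rw [p1, List.mem_filter]
    simp only [Bool.not_eq_eq_eq_not, Bool.not_true]
  have hstep : pvStepA arr cmp (nxt, prv, stk) i =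
      (r.1, prv.set i (match r.2 with | [] => (-1 : Int) | t :: _ => (t : Int)), i :: r.2) := by
    simp only [pvStepA, hr]
  rw [hstep]
  refine ⟨by rw [p2, hn], by rw [List.length_set, hp], ?_, ?_, ?_⟩
  · refine List.pairwise_cons.mpr ⟨?_, ?_⟩
    · intro b hb
      exact (((hchar b).mp ((hmemf b).mp hb).1).1)
    · exact hsort.sublist (p1 ▸ List.filter_sublist)
  · intro j
    constructor
    · intro hj
      rcases List.mem_cons.mp hj with rfl | hj'
      · exact ⟨by omega, fun k hk1 hk2 => by omega⟩
      · obtain ⟨hjs, hjc⟩ := (hmemf j).mp hj'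
        obtain ⟨hji, hjall⟩ := (hchar j).mp hjs
        refine ⟨by omega, fun k hk1 hk2 => ?_⟩
        by_cases hki : k = i
        · subst hki; exact hjc
        · exact hjall k hk1 (by omega)
    · rintro ⟨hji, hjall⟩
      by_cases hjeq : j = i
      · subst hjeq; exact List.mem_cons_self
      · have hji' : j < i := by omega
        have hjs : j ∈ stk := (hchar j).mpr ⟨hji', fun k hk1 hk2 => hjall k hk1 (by omega)⟩
        exact List.mem_cons_of_mem _ ((hmemf j).mpr ⟨hjs, hjall i hji' (by omega)⟩)
  · intro j hjn
    rw [p3 j]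
    by_cases hc : j ∈ stk ∧ cmp (arr.getD j 0) (arr.getD i 0) = true
    · rw [if_pos hc]
      have hji : j < i := ((hchar j).mp hc.1).1
      rw [if_neg ?_]
      · -- sNext j = i
        have hfind : (List.range' (j+1) (arr.length - (j+1))).find?
            (fun k => cmp (arr.getD j 0) (arr.getD k 0)) = some i := by
          apply pv_find?_range'_first (arr.length - (j+1)) (j+1) i (by omega) (by omega) hc.2
          intro k hk1 hk2
          exact ((hchar j).mp hc.1).2 k (by omega) (by omega)
        unfold sNext
        rw [hfind]
      · rintro (h1 | h1)
        · omega
        · rcases List.mem_cons.mp h1 with rfl | h1'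
          · omega
          · have := ((hmemf j).mp h1').2
            rw [hc.2] at this; exact absurd this (by simp)
    · rw [if_neg hc, hval j hjn]
      by_cases hjeq : j = i
      · subst hjeq
        rw [if_pos (Or.inl le_rfl), if_pos (Or.inr List.mem_cons_self)]
      · by_cases hji : i ≤ j
        · rw [if_pos (Or.inl hji), if_pos (Or.inl (by omega))]
        · -- j < i
          by_cases hjs : j ∈ stk
          · have hjc : cmp (arr.getD j 0) (arr.getD i 0) = false := by
              by_contra hx
              exact hc ⟨hjs, by revert hx; cases cmp (arr.getD j 0) (arr.getD i 0) <;> simp⟩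
            rw [if_pos (Or.inr hjs),
                if_pos (Or.inr (List.mem_cons_of_mem _ ((hmemf j).mpr ⟨hjs, hjc⟩)))]
          · rw [if_neg (by intro h1; rcases h1 with h1 | h1; omega; exact hjs h1),
                if_neg ?_]
            rintro (h1 | h1)
            · omega
            · rcases List.mem_cons.mp h1 with rfl | h1'
              · omega
              · exact hjs ((hmemf j).mp h1').1

theorem pv_foldF (arr : List Int) (cmp : Int → Int → Bool)
    (Hnt : ∀ a b c, cmp a b = false → cmp b c = false → cmp a c = false) :
    ∀ (cnt i : Nat) (st : List Int × List Int × List Nat),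
      i + cnt = arr.length → InvF arr cmp i st →
      InvF arr cmp arr.length ((List.range' i cnt).foldl (pvStepA arr cmp) st) := by
  intro cnt
  induction cnt with
  | zero =>
    intro i st h hInv
    simp only [List.range'_zero, List.foldl_nil]
    have : i = arr.length := by omega
    rwa [this] at hInv
  | succ m ih =>
    intro i st h hInv
    rw [List.range'_succ, List.foldl_cons]
    exact ih (i+1) _ (by omega) (pv_stepF arr cmp Hnt i (by omega) st hInv)

theorem pv_passA_next (arr : List Int) (cmp : Int → Int → Bool)
    (Hnt : ∀ a b c, cmp a b = false → cmp b c = false → cmp a c = false) :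
    (pvPassA arr cmp).1 = (List.range arr.length).map (sNext cmp arr) := by
  have hinit : InvF arr cmp 0
      (arr.map (fun _ => (arr.length : Int)), arr.map (fun _ => (-1 : Int)), []) := by
    refine ⟨by simp, by simp, List.Pairwise.nil, ?_, ?_⟩
    · intro j; simp only [List.not_mem_nil, false_iff]; omega
    · intro j hj
      rw [if_pos (Or.inl (Nat.zero_le j))]
      rw [List.getD_eq_getElem _ _ (by simpa using hj)]
      simp
  have hfin := pv_foldF arr cmp Hnt arr.length 0 _ (by omega) hinit
  rw [← List.range_eq_range'] at hfin
  obtain ⟨h1, _, _, hchar, hval⟩ := hfin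
  simp only [pvPassA]
  apply pv_eq_map_range h1
  intro j hj
  rw [hval j hj]
  by_cases hs : j ∈ ((List.range arr.length).foldl (pvStepA arr cmp)
      (arr.map (fun _ => (arr.length : Int)), arr.map (fun _ => (-1 : Int)), [])).2.2
  · rw [if_pos (Or.inr hs)]
    have hall := ((hchar j).mp hs).2
    have hfind : (List.range' (j+1) (arr.length - (j+1))).find?
        (fun k => cmp (arr.getD j 0) (arr.getD k 0)) = none := by
      apply List.find?_eq_none.mpr
      intro k hk
      have := List.mem_range'_1.mp hk
      simp only [hall k (by omega) (by omega), Bool.false_eq_true, not_false_eq_true]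
    unfold sNext
    rw [hfind]
  · rw [if_neg (by rintro (h1 | h1); omega; exact hs h1)]


theorem pv_noHit (arr : List Int) (pop : Int → Int → Bool)
    (Ht : ∀ a b c, pop a b = true → pop b c = true → pop a c = true)
    (m : Nat) (stk : List Nat)
    (Hchar : ∀ j, j ∈ stk ↔ (m + 1 ≤ j ∧ j < arr.length ∧
        ∀ k, m + 1 ≤ k → k < j → pop (arr.getD j 0) (arr.getD k 0) = false))
    (J : Nat) (hJ : J ≤ arr.length)
    (Hbelow : ∀ k ∈ stk, k < J → pop (arr.getD k 0) (arr.getD m 0) = true) :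
    ∀ j, m < j → j < J → pop (arr.getD j 0) (arr.getD m 0) = true := by
  intro j
  induction j using Nat.strong_induction_on with
  | _ j ihj =>
    intro hj1 hj2
    by_cases hjs : j ∈ stk
    · exact Hbelow j hjs hj2
    · have hex : ¬ ∀ k, m + 1 ≤ k → k < j → pop (arr.getD j 0) (arr.getD k 0) = false := by
        intro hall
        exact hjs ((Hchar j).mpr ⟨by omega, by omega, hall⟩)
      push Not at hex
      obtain ⟨k, hk1, hk2, hkp⟩ := hex
      have hkp' : pop (arr.getD j 0) (arr.getD k 0) = true := by
        revert hkp; cases pop (arr.getD j 0) (arr.getD k 0) <;> simp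
      exact Ht _ _ _ hkp' (ihj k (by omega) (by omega) (by omega))

theorem pv_stepB (arr : List Int) (pop : Int → Int → Bool)
    (Ht : ∀ a b c, pop a b = true → pop b c = true → pop a c = true)
    (Hnt : ∀ a b c, pop a b = false → pop b c = false → pop a c = false)
    (m : Nat) (hm : m < arr.length) (st : List Int × List Nat)
    (h : InvB arr pop (m+1) st) : InvB arr pop m (pvStepN arr pop st m) := by
  obtain ⟨nxt, stk⟩ := st
  obtain ⟨hn, hsort, hchar, hval⟩ := h
  simp only at hn hsort hchar hval
  have hW : List.Pairwise (fun a b =>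
      pop (arr.getD a 0) (arr.getD m 0) = false → pop (arr.getD b 0) (arr.getD m 0) = false) stk := by
    refine hsort.imp_of_mem ?_
    intro a b ha hb hab hpa
    have hba : pop (arr.getD b 0) (arr.getD a 0) = false :=
      (((hchar b).mp hb).2.2) a (((hchar a).mp ha).1) hab
    exact Hnt _ _ _ hba hpa
  have hfilter := pv_dropB_spec arr pop (arr.getD m 0) stk hW
  have hstep : pvStepN arr pop (nxt, stk) m =
      (nxt.set m (match stk.filter (fun j => !pop (arr.getD j 0) (arr.getD m 0)) with
        | [] => (arr.length : Int) | t :: _ => (t : Int)),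
       m :: stk.filter (fun j => !pop (arr.getD j 0) (arr.getD m 0))) := by
    simp only [pvStepN, hfilter]
  have hmemf : ∀ j, j ∈ stk.filter (fun j => !pop (arr.getD j 0) (arr.getD m 0)) ↔ (j ∈ stk ∧ pop (arr.getD j 0) (arr.getD m 0) = false) := by
    intro j
    rw [List.mem_filter]
    simp only [Bool.not_eq_eq_eq_not, Bool.not_true]
  have hsort' : List.Pairwise (· < ·) (stk.filter (fun j => !pop (arr.getD j 0) (arr.getD m 0))) :=
    hsort.sublist List.filter_sublist
  rw [hstep]
  refine ⟨by rw [List.length_set, hn], ?_, ?_, ?_⟩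
  · refine List.pairwise_cons.mpr ⟨?_, hsort'⟩
    intro b hb
    have := ((hchar b).mp ((hmemf b).mp hb).1).1
    omega
  · intro j
    constructor
    · intro hj
      rcases List.mem_cons.mp hj with rfl | hj'
      · exact ⟨le_rfl, hm, fun k hk1 hk2 => by omega⟩
      · obtain ⟨hjs, hjp⟩ := (hmemf j).mp hj'
        obtain ⟨hj1, hj2, hj3⟩ := (hchar j).mp hjs
        refine ⟨by omega, hj2, fun k hk1 hk2 => ?_⟩
        by_cases hkm : k = m
        · subst hkm; exact hjp
        · exact hj3 k (by omega) hk2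
    · rintro ⟨hj1, hj2, hj3⟩
      by_cases hjm : j = m
      · subst hjm; exact List.mem_cons_self
      · have hjs : j ∈ stk := (hchar j).mpr ⟨by omega, hj2, fun k hk1 hk2 => hj3 k (by omega) hk2⟩
        exact List.mem_cons_of_mem _ ((hmemf j).mpr ⟨hjs, hj3 m le_rfl (by omega)⟩)
  · intro j hjn
    by_cases hjm : j = m
    · subst hjm
      rw [pv_getD_set_self (by omega : j < nxt.length), if_pos le_rfl]
      cases hse : stk.filter (fun x => !pop (arr.getD x 0) (arr.getD j 0)) with
      | nil =>
        have hnone : ∀ k ∈ stk, pop (arr.getD k 0) (arr.getD j 0) = true := by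
          intro k hk
          by_contra hx
          have : k ∈ stk.filter (fun x => !pop (arr.getD x 0) (arr.getD j 0)) := (hmemf k).mpr ⟨hk, by revert hx; cases pop (arr.getD k 0) (arr.getD j 0) <;> simp⟩
          rw [hse] at this; exact absurd this (List.not_mem_nil)
        have hall := pv_noHit arr pop Ht j stk hchar arr.length le_rfl
          (fun k hk _ => hnone k hk)
        have hfind : (List.range' (j+1) (arr.length - (j+1))).find?
            (fun k => !pop (arr.getD k 0) (arr.getD j 0)) = none := by
          apply List.find?_eq_none.mpr
          intro k hk
          have := List.mem_range'_1.mp hk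
          simp only [hall k (by omega) (by omega), Bool.not_true, Bool.false_eq_true, not_false_eq_true]
        unfold sNextP
        rw [hfind]
      | cons j0 tl =>
        have hj0 : j0 ∈ stk.filter (fun x => !pop (arr.getD x 0) (arr.getD j 0)) := by rw [hse]; exact List.mem_cons_self
        obtain ⟨hj0s, hj0p⟩ := (hmemf j0).mp hj0
        obtain ⟨hj01, hj02, _⟩ := (hchar j0).mp hj0s
        have hbelow : ∀ k ∈ stk, k < j0 → pop (arr.getD k 0) (arr.getD j 0) = true := by
          intro k hk hkj0
          by_contra hx
          have hk' : k ∈ stk.filter (fun x => !pop (arr.getD x 0) (arr.getD j 0)) := (hmemf k).mpr ⟨hk, by revert hx; cases pop (arr.getD k 0) (arr.getD j 0) <;> simp⟩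
          rw [hse] at hk'
          rcases List.mem_cons.mp hk' with rfl | hk''
          · omega
          · have := (List.pairwise_cons.mp (hse ▸ hsort')).1 k hk''
            omega
        have hall := pv_noHit arr pop Ht j stk hchar j0 (by omega) hbelow
        have hfind : (List.range' (j+1) (arr.length - (j+1))).find?
            (fun k => !pop (arr.getD k 0) (arr.getD j 0)) = some j0 := by
          apply pv_find?_range'_first (arr.length - (j+1)) (j+1) j0 (by omega) (by omega)
            (by simp only [hj0p, Bool.not_false])
          intro k hk1 hk2
          simp only [hall k (by omega) (by omega), Bool.not_true]
        unfold sNextP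
        rw [hfind]
    · rw [pv_getD_set_ne hjm, hval j hjn]
      by_cases hj : m + 1 ≤ j
      · rw [if_pos hj, if_pos (by omega)]
      · rw [if_neg hj, if_neg (by omega)]

theorem pv_foldB (arr : List Int) (pop : Int → Int → Bool)
    (Ht : ∀ a b c, pop a b = true → pop b c = true → pop a c = true)
    (Hnt : ∀ a b c, pop a b = false → pop b c = false → pop a c = false) :
    ∀ (cnt : Nat) (st : List Int × List Nat), cnt ≤ arr.length → InvB arr pop cnt st →
      InvB arr pop 0 (((List.range cnt).reverse).foldl (pvStepN arr pop) st) := by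
  intro cnt
  induction cnt with
  | zero =>
    intro st _ hInv
    simpa using hInv
  | succ m ih =>
    intro st h hInv
    rw [List.range_succ, List.reverse_append]
    simp only [List.reverse_cons, List.reverse_nil, List.nil_append, List.cons_append,
      List.foldl_cons]
    exact ih _ (by omega) (pv_stepB arr pop Ht Hnt m (by omega) st hInv)

theorem pv_nextPass_eq (arr : List Int) (pop : Int → Int → Bool)
    (Ht : ∀ a b c, pop a b = true → pop b c = true → pop a c = true)
    (Hnt : ∀ a b c, pop a b = false → pop b c = false → pop a c = false) :
    pvNextPass arr pop = (List.range arr.length).map (sNextP pop arr) := by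
  have hinit : InvB arr pop arr.length
      (List.replicate arr.length (arr.length : Int), []) := by
    refine ⟨by simp, List.Pairwise.nil, ?_, ?_⟩
    · intro j; simp only [List.not_mem_nil, false_iff]; omega
    · intro j hj
      rw [if_neg (by omega)]
      rw [List.getD_eq_getElem _ _ (by simpa using hj)]
      simp
  have hfin := pv_foldB arr pop Ht Hnt arr.length _ le_rfl hinit
  obtain ⟨h1, _, _, hval⟩ := hfin
  simp only [pvNextPass]
  apply pv_eq_map_range h1
  intro j hj
  rw [hval j hj, if_pos (Nat.zero_le j)]

theorem pv_pop_drop (arr : List Int) (cmp : Int → Int → Bool) (i : Nat) (num : Int) :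
    ∀ (stk : List Nat) (nxt : List Int),
      (pvPopA arr cmp i num nxt stk).2 = pvDropB arr cmp num stk := by
  intro stk
  induction stk with
  | nil => intro nxt; rfl
  | cons t rest ih =>
    intro nxt
    simp only [pvPopA, pvDropB]
    split
    · exact ih _
    · rfl

theorem pv_prev_corr (arr : List Int) (cmp : Int → Int → Bool) :
    ∀ (l : List Nat) (st : List Int × List Int × List Nat),
      (l.foldl (pvStepA arr cmp) st).2 = l.foldl (pvStepP arr cmp) (st.2.1, st.2.2) := by
  intro l
  induction l with
  | nil => intro st; rfl
  | cons a t ih =>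
    intro st
    rw [List.foldl_cons, List.foldl_cons, ih]
    congr 1
    simp only [pvStepA, pvStepP, pv_pop_drop]

theorem pv_prevPass_eq (arr : List Int) (cmp : Int → Int → Bool) :
    pvPrevPass arr cmp = (pvPassA arr cmp).2 := by
  have h := pv_prev_corr arr cmp (List.range arr.length)
    (arr.map (fun _ => (arr.length : Int)), arr.map (fun _ => (-1 : Int)), [])
  have hrep : (arr.map (fun _ => (-1 : Int))) = List.replicate arr.length (-1 : Int) := by
    simp [List.map_const']
  simp only [pvPassA, pvPrevPass]
  rw [← hrep, ← h]


theorem pv_next_eq (arr : List Int) (cmp pop : Int → Int → Bool)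
    (Hcmp_nt : ∀ a b c, cmp a b = false → cmp b c = false → cmp a c = false)
    (Hp_t : ∀ a b c, pop a b = true → pop b c = true → pop a c = true)
    (Hp_nt : ∀ a b c, pop a b = false → pop b c = false → pop a c = false)
    (Hrel : ∀ a b, (!pop b a) = cmp a b) :
    (pvPassA arr cmp).1 = pvNextPass arr pop := by
  rw [pv_passA_next arr cmp Hcmp_nt, pv_nextPass_eq arr pop Hp_t Hp_nt]
  apply List.map_congr_left
  intro i _
  unfold sNext sNextP
  rw [pv_find?_ext _ (fun j _ => (Hrel (arr.getD i 0) (arr.getD j 0)).symm)]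

-- ===== VERDICT (by name: the statement is the Claim_ definition above) =====
theorem get_next_and_prev_smaller_greater_spec : Claim_equal_get_next_and_prev_smaller_greater := by
  intro arr _
  unfold Spec_get_next_and_prev_smaller_greater
  unfold get_next_and_prev_smaller_greater get_next_and_prev_smaller_greater_alt
  have hgt_nt : ∀ a b c : Int, (decide (a > b)) = false → (decide (b > c)) = false → (decide (a > c)) = false := by
    intro a b c h1 h2; simp only [decide_eq_false_iff_not, not_lt] at *; omega
  have hlt_nt : ∀ a b c : Int, (decide (a < b)) = false → (decide (b < c)) = false → (decide (a < c)) = false := by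
    intro a b c h1 h2; simp only [decide_eq_false_iff_not, not_lt] at *; omega
  have hge_t : ∀ a b c : Int, (decide (a ≥ b)) = true → (decide (b ≥ c)) = true → (decide (a ≥ c)) = true := by
    intro a b c h1 h2; simp only [decide_eq_true_eq] at *; omega
  have hge_nt : ∀ a b c : Int, (decide (a ≥ b)) = false → (decide (b ≥ c)) = false → (decide (a ≥ c)) = false := by
    intro a b c h1 h2; simp only [decide_eq_false_iff_not, not_le] at *; omega
  have hle_t : ∀ a b c : Int, (decide (a ≤ b)) = true → (decide (b ≤ c)) = true → (decide (a ≤ c)) = true := by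
    intro a b c h1 h2; simp only [decide_eq_true_eq] at *; omega
  have hle_nt : ∀ a b c : Int, (decide (a ≤ b)) = false → (decide (b ≤ c)) = false → (decide (a ≤ c)) = false := by
    intro a b c h1 h2; simp only [decide_eq_false_iff_not, not_le] at *; omega
  have h1 := pv_next_eq arr (fun a b => decide (a > b)) (fun a b => decide (a ≥ b)) hgt_nt hge_t hge_nt
    (by intro a b; rw [← decide_not]; exact decide_eq_decide.mpr (by omega))
  have h2 := pv_next_eq arr (fun a b => decide (a < b)) (fun a b => decide (a ≤ b)) hlt_nt hle_t hle_nt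
    (by intro a b; rw [← decide_not]; exact decide_eq_decide.mpr (by omega))
  have h3 := pv_prevPass_eq arr (fun a b => decide (a > b))
  have h4 := pv_prevPass_eq arr (fun a b => decide (a < b))
  simp only [← h1, ← h2, h3, h4]
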